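-- pv_equiv track=rewrite | github.com/pypi-data/pypi-mirror-16 | packages/ISA/ISA-1.0.4.tar.gz/ISA-1.0.4/isa/plugin_collectl.py | parse_collectl
-- ===== SOURCE A (Python) =====
-- def parse_collectl(str):
--     """
--     Parse the raw response from collectl.
--
--     :param str: raw response from collectl
--     :return: dictionary containing the results
--     """
--     lines = str.replace("\r", "").split("\n")
--     first = True
--     for line in lines[::-1]:
--         if len(line) > 0:
--             if first:
--                 data = line.split()
--                 first = False
--             else:
--                 if line[0] == '#':
--                     line = line[1:]
--                     header = line.split()
--                     result = {key: value for key, value in zip(header, data)}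
--                     break
--     return result
-- ===== SOURCE B (Python) =====
-- def parse_collectl(str):
--     """
--     Parse the raw response from collectl.
--
--     :param str: raw response from collectl
--     :return: dictionary containing the results
--     """
--     last_hash = None
--     for line in str.replace("\r", "").split("\n"):
--         if line:
--             header, data = last_hash, line.split()
--             if line[0] == '#':
--                 last_hash = line[1:].split()
--     return {key: value for key, value in zip(header, data)}
-- ===== Notes on version B (the rewrite author's own statement) =====
-- stated objective: alternative
-- what changed: A scans the lines backwards with a first-flag (data line first, then searches upward for the '#' header); B is one forward pass that remembers the most recent '#'-line and the latest (header, data) pair, building the dict from the final pair.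
import Mathlib
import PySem

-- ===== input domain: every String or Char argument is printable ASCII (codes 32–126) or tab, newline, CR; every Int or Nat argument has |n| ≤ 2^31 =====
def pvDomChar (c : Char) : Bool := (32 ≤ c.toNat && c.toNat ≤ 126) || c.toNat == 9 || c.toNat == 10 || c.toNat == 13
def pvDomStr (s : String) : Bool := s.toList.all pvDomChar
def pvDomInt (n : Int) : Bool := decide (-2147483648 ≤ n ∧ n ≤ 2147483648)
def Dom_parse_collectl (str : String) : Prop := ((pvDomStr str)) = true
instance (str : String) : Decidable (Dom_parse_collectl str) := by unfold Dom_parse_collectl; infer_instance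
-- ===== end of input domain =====

-- B replaces A's backward scan-with-flag by a single forward pass that remembers the most
-- recent '#'-header line (objective: alternative decomposition, same cost).

-- shared by both ports: both Pythons compute str.replace("\r", "").split("\n")
-- ("\n" ≠ "", so split? returns some; .getD [] is exact)
def pvLines (str : String) : List String :=
  (PySem.Str.split? (PySem.Str.replace str "\r" "") "\n").getD []

-- shared by both ports: {key: value for key, value in zip(header, data)}
def pvDictZip (header data : List String) : List (String × String) :=
  ((header.zip data).foldl
    (fun (d : PySem.Dict String String) kv => d.insert kv.1 kv.2) PySem.Dict.empty).items

-- ===== PORT A =====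
-- A's loop over lines[::-1]: a first-flag captures the data line, then the loop searches
-- for a '#'-header line and breaks.  Where Python raises UnboundLocalError (no non-empty
-- line, or no '#'-line above the data line — excluded by Pre_) the port returns [].
def pvLoopA : List String → Bool → List String → List (String × String)
  | [], _, _ => []
  | line :: rest, first, data =>
    if PySem.Str.len line > 0 then
      if first then pvLoopA rest false (PySem.Str.split₀ line)
      else if PySem.Str.pyGet? line 0 == some '#' then
        pvDictZip (PySem.Str.split₀ (PySem.Str.slice line (some 1) none)) data
      else pvLoopA rest first data
    else pvLoopA rest first data

def parse_collectl (str : String) : List (String × String) :=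
  pvLoopA (pvLines str).reverse true []

-- ===== PORT B =====
-- B's forward pass: state = (last_hash, latest (header, data) pair); where Python B would
-- hit an unassigned variable / zip(None, …) (excluded by Pre_) the port returns [].
def pvStepB (st : Option (List String) × Option (Option (List String) × List String))
    (line : String) : Option (List String) × Option (Option (List String) × List String) :=
  if PySem.Str.len line > 0 then
    let st1 := (st.1, some (st.1, PySem.Str.split₀ line))
    if PySem.Str.pyGet? line 0 == some '#' then
      (some (PySem.Str.split₀ (PySem.Str.slice line (some 1) none)), st1.2)
    else st1
  else st

def parse_collectl_alt (str : String) : List (String × String) :=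
  match ((pvLines str).foldl pvStepB (none, none)).2 with
  | some (some header, data) => pvDictZip header data
  | _ => []

-- ===== PRECONDITION & SPEC =====
-- Pre_ excludes exactly the inputs on which Python A raises UnboundLocalError:
-- those with no non-empty line, or no '#'-line strictly above the last non-empty line.
def Pre_parse_collectl (str : String) : Prop :=
  let rev' := ((pvLines str).reverse).dropWhile (fun l => PySem.Str.len l == 0)
  rev' ≠ [] ∧ rev'.tail.any (fun l => PySem.Str.pyGet? l 0 == some '#') = true
instance (str : String) : Decidable (Pre_parse_collectl str) := by
  unfold Pre_parse_collectl; infer_instance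

def pvWitness_parse_collectl : String := "#cpu user sys\n12 34"

def Spec_parse_collectl (str : String) (out : List (String × String)) : Prop :=
  out = parse_collectl_alt str
instance (str : String) (out : List (String × String)) : Decidable (Spec_parse_collectl str out) := by
  unfold Spec_parse_collectl; infer_instance

-- ===== CLAIM (what is proved, stated in full; the proofs are below) =====
def Claim_equal_parse_collectl : Prop :=
  ∀ (str : String), Dom_parse_collectl str → Pre_parse_collectl str →
    Spec_parse_collectl str (parse_collectl str)

-- ===== LEMMAS AND PROOFS =====

-- the '#'-test both programs make, and the header list it extracts
def pvIsHash (l : String) : Bool := PySem.Str.pyGet? l 0 == some '#'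
def pvHash (l : String) : List String := PySem.Str.split₀ (PySem.Str.slice l (some 1) none)

-- A's second phase is a search for the first '#'-line of the remaining reversed lines
lemma loopA_false (t : List String) (data : List String) :
    pvLoopA t false data =
      match t.find? pvIsHash with
      | some h => pvDictZip (pvHash h) data
      | none => [] := by
  induction t with
  | nil => simp [pvLoopA]
  | cons l rest ih =>
    cases hcs : l.toList with
    | nil =>
      have he : l = "" := String.toList_eq_nil_iff.mp hcs
      subst he
      simpa [pvLoopA, List.find?_cons, pvIsHash, PySem.List.pyGet?] using ih
    | cons c cs =>
      have hlen : 0 < l.length := by rw [← String.length_toList, hcs]; simp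
      by_cases hc : c = '#' <;>
        simp [pvLoopA, List.find?_cons, pvIsHash, pvHash, hcs, hc, hlen,
          PySem.List.pyGet?, PySem.List.pyIdx?, ih]

-- A's first phase drops the trailing empty lines and captures the data line
lemma loopA_true (rs : List String) :
    pvLoopA rs true [] =
      match rs.dropWhile (fun l => PySem.Str.len l == 0) with
      | [] => []
      | d :: t => pvLoopA t false (PySem.Str.split₀ d) := by
  induction rs with
  | nil => simp [pvLoopA]
  | cons l rest ih =>
    by_cases he : l = ""
    · subst he
      simpa [pvLoopA, List.dropWhile_cons] using ih
    · have hlen : 0 < l.length := by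
        rw [← String.length_toList]
        cases hcs : l.toList with
        | nil => exact absurd (String.toList_eq_nil_iff.mp hcs) he
        | cons c cs => simp
      simp [pvLoopA, List.dropWhile_cons, he, hlen]

-- B's forward fold, characterised over the reversed line list
lemma foldB_char (ls : List String) (lh : Option (List String))
    (fd : Option (Option (List String) × List String)) :
    ls.foldl pvStepB (lh, fd) =
      ((match ls.reverse.find? pvIsHash with
        | some h => some (pvHash h)
        | none => lh),
       (match ls.reverse.dropWhile (fun l => PySem.Str.len l == 0) with
        | [] => fd
        | d :: t => some ((match t.find? pvIsHash with
                           | some h => some (pvHash h)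
                           | none => lh), PySem.Str.split₀ d))) := by
  induction ls using List.reverseRecOn generalizing lh fd with
  | nil => simp
  | append_singleton init l ih =>
    rw [List.foldl_append, ih]
    cases hcs : l.toList with
    | nil =>
      have he : l = "" := String.toList_eq_nil_iff.mp hcs
      subst he
      simp [pvStepB, List.find?_cons, List.dropWhile_cons, pvIsHash, PySem.List.pyGet?]
    | cons c cs =>
      have he : l ≠ "" := by
        intro h; rw [h] at hcs; simp at hcs
      have hlen : 0 < l.length := by rw [← String.length_toList, hcs]; simp
      by_cases hc : c = '#' <;>
        simp [pvStepB, List.find?_cons, List.dropWhile_cons, pvIsHash, pvHash, hcs, hc, he, hlen,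
          PySem.List.pyGet?, PySem.List.pyIdx?]

-- ===== VERDICT (by name: the statement is the Claim_ definition above) =====
theorem parse_collectl_spec : Claim_equal_parse_collectl := by
  intro str _ _
  unfold Spec_parse_collectl parse_collectl parse_collectl_alt
  rw [loopA_true, foldB_char]
  cases (pvLines str).reverse.dropWhile (fun l => PySem.Str.len l == 0) with
  | nil => simp
  | cons d t =>
    simp only [loopA_false]
    cases t.find? pvIsHash <;> simp
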